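-- pv_equiv track=rewrite | github.com/madelineclausen/Python-AQI | project3.py | narrow
-- ===== SOURCE A (Python) =====
-- def narrow(locations: dict, threshold: int, max_locations: int) -> dict:
--     '''
--     Takes in the dictionary after AQI conversion
--     and narrows options based on threshold and max
--     number of locations. It does threshold first in
--     order to determine which AQI places match, and
--     then takes the worst of those and returns the
--     final results.
--     '''
--     sorted_dict = {}
--     sorted_names = sorted(locations, key=locations.get, reverse=True)
--     for name in sorted_names:
--         sorted_dict[name] = locations[name]
--     threshold_dict = {}
--     for key, value in sorted_dict.items():
--         if value >= threshold:
--             threshold_dict[key] = value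
--     final_dict = {}
--     x = 0
--     for key, value in threshold_dict.items():
--         if x < max_locations:
--             final_dict[key] = value
--             x += 1
--     return final_dict
-- ===== SOURCE B (Python) =====
-- def narrow(locations: dict, threshold: int, max_locations: int) -> dict:
--     best = []  # (name, aqi) pairs, descending by aqi, never more than max_locations long
--     for key, value in locations.items():
--         if value < threshold:
--             continue
--         i = 0
--         while i < len(best) and best[i][1] >= value:
--             i += 1
--         best.insert(i, (key, value))
--         if len(best) > max_locations:
--             best.pop()
--     return dict(best)
-- ===== Notes on version B (the rewrite author's own statement) =====
-- stated objective: alternative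
-- what changed: B makes a single pass over the dict, maintaining a bounded buffer of at most max_locations qualifying entries by positional insertion and popping the smallest, instead of A's full sort, dict-rebuild pass, threshold pass and counter loop.
import Mathlib
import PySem

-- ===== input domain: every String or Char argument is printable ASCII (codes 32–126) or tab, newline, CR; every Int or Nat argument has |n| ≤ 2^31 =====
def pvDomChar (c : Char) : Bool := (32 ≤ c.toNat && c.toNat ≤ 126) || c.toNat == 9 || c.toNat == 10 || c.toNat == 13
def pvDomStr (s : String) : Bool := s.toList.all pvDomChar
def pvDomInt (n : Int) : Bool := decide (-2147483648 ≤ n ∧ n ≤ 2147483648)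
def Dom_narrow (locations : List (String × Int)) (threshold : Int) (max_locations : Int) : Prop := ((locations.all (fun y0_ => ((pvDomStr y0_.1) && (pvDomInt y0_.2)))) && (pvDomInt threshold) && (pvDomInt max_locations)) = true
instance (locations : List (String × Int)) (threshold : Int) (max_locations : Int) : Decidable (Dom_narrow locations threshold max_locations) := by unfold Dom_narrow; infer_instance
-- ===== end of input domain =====

-- B replaces A's full sort + rebuild + filter + counter passes by a single pass that maintains a
-- bounded buffer of the current top max_locations qualifying entries ('alternative').

-- ===== PORT A =====
-- the dict argument arrives as an association list; a Python dict has unique keys in insertion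
-- order, which is exactly (PySem.Dict.ofList locations).items
def narrow (locations : List (String × Int)) (threshold : Int) (max_locations : Int) : List (String × Int) :=
  let d := PySem.Dict.ofList locations
  -- sorted(locations, key=locations.get, reverse=True): every name is a key of d, so
  -- locations.get name = some value and getD _ 0 is exact
  let sorted_names := PySem.List.sorted d.keys (fun n => d.getD n 0) true
  -- for name in sorted_names: sorted_dict[name] = locations[name]
  let sorted_dict := sorted_names.foldl (fun acc n => acc.insert n (d.getD n 0)) PySem.Dict.empty
  -- for key, value in sorted_dict.items(): if value >= threshold: threshold_dict[key] = value
  let threshold_dict := sorted_dict.items.foldl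
    (fun acc kv => if threshold ≤ kv.2 then acc.insert kv.1 kv.2 else acc) PySem.Dict.empty
  -- x = 0; for key, value in threshold_dict.items(): if x < max_locations: final_dict[key] = value; x += 1
  let final := threshold_dict.items.foldl
    (fun st kv => if st.2 < max_locations then (st.1.insert kv.1 kv.2, st.2 + 1) else st)
    (PySem.Dict.empty, (0 : Int))
  final.1.items

-- ===== PORT B =====
-- the while-loop of Source B: walk past the buffer entries whose value is >= the new value and insert there
def bInsert (x : String × Int) : List (String × Int) → List (String × Int)
  | [] => [x]
  | y :: ys => if x.2 ≤ y.2 then y :: bInsert x ys else x :: y :: ys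

def narrow_alt (locations : List (String × Int)) (threshold : Int) (max_locations : Int) : List (String × Int) :=
  -- for key, value in locations.items(): …
  let best := (PySem.Dict.ofList locations).items.foldl
    (fun best kv =>
      if kv.2 < threshold then best          -- continue
      else
        let best' := bInsert kv best         -- best.insert(i, (key, value))
        if max_locations < (best'.length : Int) then best'.dropLast else best')  -- best.pop()
    []
  -- return dict(best)
  (PySem.Dict.ofList best).items

-- ===== PRECONDITION & SPEC =====
def Spec_narrow (locations : List (String × Int)) (threshold : Int) (max_locations : Int) (out : List (String × Int)) : Prop := out = narrow_alt locations threshold max_locations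
instance (locations : List (String × Int)) (threshold : Int) (max_locations : Int) (out : List (String × Int)) : Decidable (Spec_narrow locations threshold max_locations out) := by unfold Spec_narrow; infer_instance

-- ===== CLAIM (what is proved, stated in full; the proofs are below) =====
def Claim_equal_narrow : Prop := ∀ (locations : List (String × Int)) (threshold : Int) (max_locations : Int), Dom_narrow locations threshold max_locations → Spec_narrow locations threshold max_locations (narrow locations threshold max_locations)

-- ===== LEMMAS AND PROOFS =====

-- insertBy puts x in front when it goes before everything
theorem insertBy_head {α : Type} (b : α → α → Bool) (x : α) (zs : List α)
    (h : ∀ z ∈ zs, b x z = true) : PySem.List.insertBy b x zs = x :: zs := by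
  cases zs with
  | nil => rfl
  | cons y ys => simp [PySem.List.insertBy, h y (by simp)]

-- filtering a descending-sorted list commutes with insertBy
theorem filter_insertBy_rev {α : Type} (key : α → Int) (p : α → Bool) (x : α) :
    ∀ S : List α, S.Pairwise (fun a c => key c ≤ key a) →
    (PySem.List.insertBy (fun a c => decide (key c < key a)) x S).filter p =
      if p x then PySem.List.insertBy (fun a c => decide (key c < key a)) x (S.filter p)
      else S.filter p := by
  intro S
  induction S with
  | nil => intro _; by_cases hp : p x <;> simp [PySem.List.insertBy, hp]
  | cons y ys ih =>
    intro hpw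
    rw [List.pairwise_cons] at hpw
    by_cases hb : key y < key x
    · -- x goes before y, hence before every element of y :: ys and of its filtering
      have h1 : PySem.List.insertBy (fun a c => decide (key c < key a)) x (y :: ys) = x :: y :: ys := by
        simp [PySem.List.insertBy, hb]
      have h2 : PySem.List.insertBy (fun a c => decide (key c < key a)) x ((y :: ys).filter p)
          = x :: (y :: ys).filter p := by
        apply insertBy_head
        intro z hz
        have hz' : z ∈ y :: ys := List.mem_of_mem_filter hz
        rcases List.mem_cons.mp hz' with h | h
        · subst h; simpa using hb
        · have := hpw.1 z h; simp; omega
      rw [h1]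
      by_cases hp : p x
      · simp [hp, h2]
      · simp [hp]
    · have h1 : PySem.List.insertBy (fun a c => decide (key c < key a)) x (y :: ys)
          = y :: PySem.List.insertBy (fun a c => decide (key c < key a)) x ys := by
        simp [PySem.List.insertBy, hb]
      rw [h1]
      by_cases hpy : p y
      · by_cases hp : p x
        · simp only [List.filter_cons, hpy, ih hpw.2, hp, if_true]
          have : PySem.List.insertBy (fun a c => decide (key c < key a)) x (y :: ys.filter p)
              = y :: PySem.List.insertBy (fun a c => decide (key c < key a)) x (ys.filter p) := by
            simp [PySem.List.insertBy, hb]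
          simp [this]
        · simp [hpy, ih hpw.2, hp]
      · simp only [List.filter_cons, hpy, Bool.false_eq_true, if_false]
        exact ih hpw.2

-- filter commutes with Python's stable descending sort
theorem filter_sorted_rev {α : Type} (key : α → Int) (p : α → Bool) (l : List α) :
    (PySem.List.sorted l key true).filter p = PySem.List.sorted (l.filter p) key true := by
  induction l using List.reverseRecOn with
  | nil => rfl
  | append_singleton l x ih =>
    rw [PySem.List.sorted_rev_eq_foldl_insertBy, List.foldl_append,
      ← PySem.List.sorted_rev_eq_foldl_insertBy]
    simp only [List.foldl_cons, List.foldl_nil]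
    rw [filter_insertBy_rev key p x _ (PySem.List.sorted_pairwise_rev l key), ih]
    by_cases hp : p x
    · rw [if_pos hp, List.filter_append,
        show List.filter p [x] = [x] from by simp [hp],
        PySem.List.sorted_rev_eq_foldl_insertBy (l.filter p ++ [x]), List.foldl_append,
        ← PySem.List.sorted_rev_eq_foldl_insertBy]
      simp
    · rw [if_neg hp, List.filter_append]
      simp [hp]

-- mapping through insertBy when the orders correspond
theorem map_insertBy {α β : Type} (f : α → β) (b : α → α → Bool) (b' : β → β → Bool)
    (x : α) : ∀ ys : List α, (∀ y ∈ ys, b' (f x) (f y) = b x y) →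
    PySem.List.insertBy b' (f x) (ys.map f) = (PySem.List.insertBy b x ys).map f := by
  intro ys
  induction ys with
  | nil => intro _; rfl
  | cons y ys ih =>
    intro h
    have hy := h y (by simp)
    by_cases hb : b x y
    · simp [PySem.List.insertBy, hy, hb]
    · simp only [List.map_cons, PySem.List.insertBy, hy, hb, Bool.false_eq_true, if_false]
      rw [ih (fun z hz => h z (by simp [hz]))]

-- the descending order on pair-values, and its name-side mirror through a dict
theorem foldl_insert_map (l : List (String × Int)) (hnd : (l.map Prod.fst).Nodup) :
    ∀ (rest acc : List (String × Int)), (∀ p ∈ rest, p ∈ l) → (∀ p ∈ acc, p ∈ l) →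
    List.foldl (fun s n => PySem.List.insertBy
        (fun a c => decide ((PySem.Dict.mk l).getD c 0 < (PySem.Dict.mk l).getD a 0)) n s)
      (acc.map Prod.fst) (rest.map Prod.fst)
    = (List.foldl (fun s q => PySem.List.insertBy (fun a c => decide (c.2 < a.2)) q s) acc rest).map
        Prod.fst := by
  intro rest
  induction rest with
  | nil => intro acc _ _; rfl
  | cons hd rest ih =>
    intro acc hrest hacc
    have hget : ∀ r ∈ l, (PySem.Dict.mk l).getD r.1 0 = r.2 := by
      intro r hr
      exact PySem.Dict.getD_of_mem_items (d := PySem.Dict.mk l) (by simpa using hr) (by simpa [PySem.Dict.keys] using hnd) 0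
    simp only [List.map_cons, List.foldl_cons]
    rw [map_insertBy Prod.fst (fun a c => decide (c.2 < a.2))
        (fun a c => decide ((PySem.Dict.mk l).getD c 0 < (PySem.Dict.mk l).getD a 0)) hd acc
        (by
          intro y hy
          show decide ((PySem.Dict.mk l).getD y.1 0 < (PySem.Dict.mk l).getD hd.1 0)
              = decide (y.2 < hd.2)
          rw [hget hd (hrest hd (by simp)), hget y (hacc y hy)])]
    apply ih
    · intro p hp; exact hrest p (by simp [hp])
    · intro p hp
      rcases (PySem.List.mem_insertBy _ _ _ _).mp hp with h | h
      · exact hrest p (by simp [h])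
      · exact hacc p h

-- sorting a dict's keys by value and re-pairing = sorting its items by value
theorem sorted_items (l : List (String × Int)) (hnd : (l.map Prod.fst).Nodup) :
    (PySem.List.sorted (l.map Prod.fst) (fun n => (PySem.Dict.mk l).getD n 0) true).map
        (fun n => (n, (PySem.Dict.mk l).getD n 0))
      = PySem.List.sorted l (fun p => p.2) true := by
  have hget : ∀ r ∈ l, (PySem.Dict.mk l).getD r.1 0 = r.2 := by
    intro r hr
    exact PySem.Dict.getD_of_mem_items (d := PySem.Dict.mk l) (by simpa using hr) (by simpa [PySem.Dict.keys] using hnd) 0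
  have hkeys : PySem.List.sorted (l.map Prod.fst) (fun n => (PySem.Dict.mk l).getD n 0) true
      = (PySem.List.sorted l (fun p => p.2) true).map Prod.fst := by
    rw [PySem.List.sorted_rev_eq_foldl_insertBy, PySem.List.sorted_rev_eq_foldl_insertBy]
    exact foldl_insert_map l hnd l [] (fun p hp => hp) (by simp)
  rw [hkeys, List.map_map]
  have hcong : ∀ p ∈ PySem.List.sorted l (fun p => p.2) true,
      ((fun n => (n, (PySem.Dict.mk l).getD n 0)) ∘ Prod.fst) p = id p := by
    intro p hp
    have hp' : p ∈ l := (PySem.List.mem_sorted _ _ _ _).mp hp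
    simp [hget p hp']
  rw [List.map_congr_left hcong, List.map_id]

-- the counter loop keeps the first (max_locations - x) items
theorem take_fold (maxl : Int) :
    ∀ (T : List (String × Int)) (d : PySem.Dict String Int) (x : Int),
    (∀ p ∈ T, d.contains p.1 = false) → (T.map Prod.fst).Nodup →
    (T.foldl (fun st kv => if st.2 < maxl then (st.1.insert kv.1 kv.2, st.2 + 1) else st)
      (d, x)).1.items = d.items ++ T.take (maxl - x).toNat := by
  intro T
  induction T with
  | nil => intro d x _ _; simp
  | cons p T ih =>
    intro d x hfresh hnd
    simp only [List.foldl_cons]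
    by_cases hx : x < maxl
    · rw [if_pos hx]
      have hins : (d.insert p.1 p.2).items = d.items ++ [p] := by
        rw [PySem.Dict.items_insert_of_not_contains (h := hfresh p (by simp))]
      rw [ih (d.insert p.1 p.2) (x + 1)
          (by
            intro q hq
            rw [PySem.Dict.contains_insert]
            have hqp : q.1 ≠ p.1 := by
              intro h
              have := hnd
              simp only [List.map_cons, List.nodup_cons] at this
              exact this.1 (h ▸ List.mem_map_of_mem hq)
            simp [hqp, hfresh q (by simp [hq])])
          (by simpa using hnd.of_cons)]
      rw [hins]
      have : (maxl - x).toNat = (maxl - (x + 1)).toNat + 1 := by omega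
      simp [this]
    · rw [if_neg hx]
      rw [ih d x (fun q hq => hfresh q (by simp [hq])) hnd.of_cons]
      have : (maxl - x).toNat = 0 := by omega
      simp [this]

-- items of a conditional-insert loop over fresh distinct keys = the filtered list
theorem items_filter_fold (c : String × Int → Bool) (T : List (String × Int))
    (hnd : (T.map Prod.fst).Nodup) :
    (T.foldl (fun acc kv => if c kv then acc.insert kv.1 kv.2 else acc) PySem.Dict.empty).items
      = T.filter c := by
  rw [← List.foldl_filter]
  have := PySem.Dict.items_foldl_insert_fresh (T.filter c) Prod.fst Prod.snd PySem.Dict.empty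
    (by intro a _; simp [PySem.Dict.contains_empty])
    (by
      have : (T.filter c).map Prod.fst |>.Sublist (T.map Prod.fst) :=
        List.Sublist.map Prod.fst (List.filter_sublist (l := T))
      exact this.nodup hnd)
  simpa using this

-- keys of the input dict are distinct
theorem nodup_fst (locations : List (String × Int)) :
    (((PySem.Dict.ofList locations).items.map Prod.fst)).Nodup := by
  have h := PySem.Dict.nodup_keys_ofList (ps := locations)
  simpa [PySem.Dict.keys] using h

-- A = take max_locations of (sort all items, then filter)
theorem narrow_eq (locations : List (String × Int)) (threshold : Int) (max_locations : Int) :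
    narrow locations threshold max_locations =
      ((PySem.List.sorted (PySem.Dict.ofList locations).items (fun p => p.2) true).filter
        (fun kv => decide (threshold ≤ kv.2))).take max_locations.toNat := by
  unfold narrow
  simp only []
  have hnd := nodup_fst locations
  have hkeys : (PySem.Dict.ofList locations).keys
      = (PySem.Dict.ofList locations).items.map Prod.fst := by
    simp [PySem.Dict.keys]
  rw [hkeys]
  -- the first loop rebuilds the dict in sorted-by-value order
  have hnames : (PySem.List.sorted ((PySem.Dict.ofList locations).items.map Prod.fst)
      (fun n => (PySem.Dict.ofList locations).getD n 0) true).Nodup :=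
    (PySem.List.sorted_perm _ _ _).nodup_iff.mpr hnd
  have h1 := PySem.Dict.items_foldl_insert_fresh
      (PySem.List.sorted ((PySem.Dict.ofList locations).items.map Prod.fst)
        (fun n => (PySem.Dict.ofList locations).getD n 0) true)
      (fun n => n) (fun n => (PySem.Dict.ofList locations).getD n 0) PySem.Dict.empty
      (by intro a _; simp) (by simpa using hnames)
  rw [h1]
  clear h1
  have h2 := sorted_items (PySem.Dict.ofList locations).items hnd
  have hmk : PySem.Dict.mk (PySem.Dict.ofList locations).items = PySem.Dict.ofList locations := rfl
  rw [hmk] at h2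
  rw [show (PySem.Dict.empty : PySem.Dict String Int).items = [] from rfl, List.nil_append, h2]
  -- the threshold loop is a filter
  rw [show (fun (acc : PySem.Dict String Int) (kv : String × Int) =>
        if threshold ≤ kv.2 then acc.insert kv.1 kv.2 else acc)
      = (fun acc kv => if (fun kv : String × Int => decide (threshold ≤ kv.2)) kv then
          acc.insert kv.1 kv.2 else acc) from by funext acc kv; simp]
  have hndS : ((PySem.List.sorted (PySem.Dict.ofList locations).items (fun p => p.2) true).map
      Prod.fst).Nodup := (((PySem.List.sorted_perm _ _ _)).map Prod.fst).nodup_iff.mpr hnd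
  rw [items_filter_fold _ _ hndS]
  -- the counter loop is a take
  have hndT : (((PySem.List.sorted (PySem.Dict.ofList locations).items (fun p => p.2) true).filter
      (fun kv => decide (threshold ≤ kv.2))).map Prod.fst).Nodup :=
    (List.Sublist.map Prod.fst (List.filter_sublist (l := _))).nodup hndS
  rw [take_fold max_locations _ PySem.Dict.empty 0 (by intro p _; simp) hndT]
  simp [show (PySem.Dict.empty : PySem.Dict String Int).items = [] from rfl]

-- ===== B-side lemmas =====

-- bInsert is insertBy with the stable-descending order on values
theorem bInsert_eq (x : String × Int) :
    ∀ s, bInsert x s = PySem.List.insertBy (fun a c => decide (c.2 < a.2)) x s := by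
  intro s
  induction s with
  | nil => rfl
  | cons y ys ih =>
    by_cases h : x.2 ≤ y.2
    · have : ¬ y.2 < x.2 := by omega
      simp [bInsert, PySem.List.insertBy, h, this, ih]
    · have : y.2 < x.2 := by omega
      simp [bInsert, PySem.List.insertBy, h, this]

-- insertBy adds one element
theorem length_insertBy {α : Type} (b : α → α → Bool) (x : α) :
    ∀ s : List α, (PySem.List.insertBy b x s).length = s.length + 1 := by
  intro s
  induction s with
  | nil => rfl
  | cons y ys ih =>
    by_cases h : b x y
    · simp [PySem.List.insertBy, h]
    · simp [PySem.List.insertBy, h, ih]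

-- truncating to K commutes with insertBy
theorem take_insertBy {α : Type} (b : α → α → Bool) (x : α) :
    ∀ (s : List α) (K : Nat),
    (PySem.List.insertBy b x (s.take K)).take K = (PySem.List.insertBy b x s).take K := by
  intro s
  induction s with
  | nil => intro K; simp
  | cons y ys ih =>
    intro K
    cases K with
    | zero => simp
    | succ K' =>
      by_cases h : b x y
      · simp only [List.take_succ_cons, PySem.List.insertBy, h, if_true, List.take_succ_cons]
        cases K' with
        | zero => simp
        | succ K'' => simp [List.take_take]
      · simp [PySem.List.insertBy, h, ih K']

-- Source B's insert-then-pop loop computes the K-truncation of the insertion sort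
theorem fold_take (maxl : Int) :
    ∀ (L s : List (String × Int)),
    L.foldl (fun t kv =>
        let t' := bInsert kv t
        if maxl < (t'.length : Int) then t'.dropLast else t') (s.take maxl.toNat)
      = (L.foldl (fun t kv => PySem.List.insertBy (fun a c => decide (c.2 < a.2)) kv t) s).take
          maxl.toNat := by
  intro L
  induction L with
  | nil => intro s; simp
  | cons kv L ih =>
    intro s
    simp only [List.foldl_cons]
    have hstep :
        (let t' := bInsert kv (s.take maxl.toNat)
         if maxl < (t'.length : Int) then t'.dropLast else t')
        = (PySem.List.insertBy (fun a c => decide (c.2 < a.2)) kv s).take maxl.toNat := by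
      simp only [bInsert_eq]
      set ins := PySem.List.insertBy (fun a c => decide (c.2 < a.2)) kv (s.take maxl.toNat) with hins
      have hlen : ins.length = (s.take maxl.toNat).length + 1 := length_insertBy _ _ _
      have hlenle : (s.take maxl.toNat).length ≤ maxl.toNat := by simp
      by_cases hmx : maxl < (ins.length : Int)
      · rw [if_pos hmx, List.dropLast_eq_take,
          show ins.length - 1 = maxl.toNat from by omega, hins, take_insertBy]
      · rw [if_neg hmx, ← take_insertBy, ← hins]
        exact (List.take_of_length_le (by omega)).symm
    rw [hstep]
    exact ih _

-- a nodup-keyed pair list round-trips through dict()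
theorem items_ofList_of_nodup (l : List (String × Int)) (h : (l.map Prod.fst).Nodup) :
    (PySem.Dict.ofList l).items = l := by
  have := PySem.Dict.items_foldl_insert_fresh l Prod.fst Prod.snd PySem.Dict.empty
    (by intro a _; simp [PySem.Dict.contains_empty]) h
  simpa [PySem.Dict.ofList, PySem.Dict.update] using this

-- B = take max_locations of (filter the items, then sort)
theorem narrow_alt_eq (locations : List (String × Int)) (threshold : Int) (max_locations : Int) :
    narrow_alt locations threshold max_locations =
      (PySem.List.sorted ((PySem.Dict.ofList locations).items.filter
          (fun kv => decide (threshold ≤ kv.2))) (fun p => p.2) true).take max_locations.toNat := by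
  unfold narrow_alt
  simp only []
  have hnd := nodup_fst locations
  -- the continue branch is a filter
  rw [show (fun (best : List (String × Int)) (kv : String × Int) =>
        if kv.2 < threshold then best
        else
          let best' := bInsert kv best
          if max_locations < (best'.length : Int) then best'.dropLast else best')
      = (fun best kv => if (fun kv : String × Int => decide (threshold ≤ kv.2)) kv then
          (fun t (kv : String × Int) =>
            let t' := bInsert kv t
            if max_locations < (t'.length : Int) then t'.dropLast else t') best kv
          else best) from by
      funext best kv
      by_cases h : kv.2 < threshold
      · simp [h, show ¬ threshold ≤ kv.2 by omega]
      · simp [h, show threshold ≤ kv.2 by omega]]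
  rw [← List.foldl_filter]
  have h0 : ([] : List (String × Int)) = ([] : List (String × Int)).take max_locations.toNat := by
    simp
  rw [h0, fold_take]
  rw [← PySem.List.sorted_rev_eq_foldl_insertBy]
  -- dict(best): best's keys are distinct, so it round-trips
  have hndS : (((PySem.List.sorted ((PySem.Dict.ofList locations).items.filter
      (fun kv => decide (threshold ≤ kv.2))) (fun p => p.2) true)).map Prod.fst).Nodup := by
    have hndF : (((PySem.Dict.ofList locations).items.filter
        (fun kv => decide (threshold ≤ kv.2))).map Prod.fst).Nodup :=
      (List.Sublist.map Prod.fst (List.filter_sublist (l := _))).nodup hnd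
    exact (((PySem.List.sorted_perm _ _ _)).map Prod.fst).nodup_iff.mpr hndF
  exact items_ofList_of_nodup _ ((List.Sublist.map Prod.fst (List.take_sublist _ _)).nodup hndS)

-- ===== VERDICT (by name: the statement is the Claim_ definition above) =====
theorem narrow_spec : Claim_equal_narrow := by
  intro locations threshold max_locations _
  unfold Spec_narrow
  rw [narrow_eq, narrow_alt_eq, ← filter_sorted_rev]
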